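-- pv_equiv track=rewrite | github.com/gigabitamin/TIL | test copy 2.py | can_merge_strings
-- ===== SOURCE A (Python) =====
-- def can_merge_strings(N, A):
--     # 끈을 길이 순으로 정렬
--     A.sort()
--
--     while len(A) > 1:
--         # 가장 짧은 두 개의 끈을 선택
--         a = A.pop(0)
--         b = A.pop(0)
--
--         # 두 끈의 합
--         W = a + b
--
--         # ⌊W/2⌋와 ⌈W/2⌉가 각각 a, b인지 확인
--         if a != W // 2 or b != (W + 1) // 2:
--             return "FALSE"
--
--         # 두 끈을 이어붙인 결과를 다시 리스트에 넣고 정렬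
--         A.append(W)
--         A.sort()
--
--     return "TRUE"
-- ===== SOURCE B (Python) =====
-- from collections import deque
--
--
-- def can_merge_strings(N, A):
--     # Sort once, then run the classic two-queue Huffman merge: the next sum is
--     # always >= every sum still queued, so a FIFO of sums stays sorted and the
--     # two smallest items are always at the fronts.  (A mutates its list
--     # argument in place; B leaves it untouched -- equivalence is about the
--     # return value.)
--     xs = sorted(A)
--     n = len(xs)
--     q = deque()
--     i = 0
--     while (n - i) + len(q) > 1:
--         if i < n and (not q or xs[i] <= q[0]):
--             a = xs[i]
--             i += 1
--         else:
--             a = q.popleft()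
--         if i < n and (not q or xs[i] <= q[0]):
--             b = xs[i]
--             i += 1
--         else:
--             b = q.popleft()
--         if b > a + 1:
--             return "FALSE"
--         q.append(a + b)
--     return "TRUE"
-- ===== Notes on version B (the rewrite author's own statement) =====
-- stated objective: alternative
-- what changed: Replaces the re-sort-after-every-merge loop (pop(0) twice, append, A.sort()) by one initial sort plus a two-queue Huffman merge: a FIFO of merged sums stays sorted because each new sum is at least every queued sum, so each step pops the two smallest without re-sorting (A often exits early, so the measured wall-clock is comparable).
import Mathlib
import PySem

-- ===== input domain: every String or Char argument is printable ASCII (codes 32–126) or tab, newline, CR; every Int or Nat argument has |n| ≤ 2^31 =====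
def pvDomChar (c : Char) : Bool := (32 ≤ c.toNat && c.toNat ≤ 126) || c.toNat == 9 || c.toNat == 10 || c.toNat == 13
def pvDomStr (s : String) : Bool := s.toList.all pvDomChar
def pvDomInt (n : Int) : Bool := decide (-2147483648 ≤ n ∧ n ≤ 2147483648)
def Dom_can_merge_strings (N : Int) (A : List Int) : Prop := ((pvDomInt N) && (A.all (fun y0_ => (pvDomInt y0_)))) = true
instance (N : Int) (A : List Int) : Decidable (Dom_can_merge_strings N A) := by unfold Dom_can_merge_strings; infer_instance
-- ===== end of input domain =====

-- B replaces A's re-sort-after-every-merge loop by one sort plus a two-queue Huffman merge.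
-- A mutates/consumes its list argument in place, B does not — the equivalence proved is about the RETURN value only.


-- ===== PORT A =====
-- A's while-loop: a = A.pop(0); b = A.pop(0); check; A.append(W); A.sort()
def pvAloop : List Int → String
  | a :: b :: rest =>
      if a ≠ PySem.Int.floordiv (a + b) 2 ∨ b ≠ PySem.Int.floordiv (a + b + 1) 2 then "FALSE"
      else pvAloop (PySem.List.sorted (rest ++ [a + b]) (fun x => x) false)
  | _ => "TRUE"
  termination_by l => l.length
  decreasing_by simp [PySem.List.length_sorted]

def can_merge_strings (N : Int) (A : List Int) : String :=
  pvAloop (PySem.List.sorted A (fun x => x) false)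

-- ===== PORT B =====
-- pop the smallest of the two front elements (B's two `if` branches; prefers xs on ties)
def pvPop : List Int → List Int → Option (Int × List Int × List Int)
  | [], [] => none
  | x :: xs, [] => some (x, xs, [])
  | [], y :: q => some (y, [], q)
  | x :: xs, y :: q => if x ≤ y then some (x, xs, y :: q) else some (y, x :: xs, q)

theorem pvPop_length {xs q xs' q' : List Int} {v : Int}
    (h : pvPop xs q = some (v, xs', q')) :
    xs'.length + q'.length + 1 = xs.length + q.length := by
  match xs, q with
  | [], [] => simp [pvPop] at h
  | x :: xs, [] => simp [pvPop] at h; obtain ⟨_, h2, h3⟩ := h; subst h2; subst h3; simp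
  | [], y :: q => simp [pvPop] at h; obtain ⟨_, h2, h3⟩ := h; subst h2; subst h3; simp
  | x :: xs, y :: q =>
      simp only [pvPop] at h
      split at h <;> (simp at h; obtain ⟨_, h2, h3⟩ := h; subst h2; subst h3; simp) <;> omega

-- B's while-loop over (unconsumed sorted originals, FIFO of sums)
def pvBloop (xs q : List Int) : String :=
  match h1 : pvPop xs q with
  | none => "TRUE"
  | some (a, xs1, q1) =>
    match h2 : pvPop xs1 q1 with
    | none => "TRUE"
    | some (b, xs2, q2) =>
      if a + 1 < b then "FALSE" else pvBloop xs2 (q2 ++ [a + b])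
  termination_by xs.length + q.length
  decreasing_by
    have e1 := pvPop_length h1
    have e2 := pvPop_length h2
    simp only [List.length_append, List.length_cons, List.length_nil]
    omega

def can_merge_strings_alt (N : Int) (A : List Int) : String :=
  pvBloop (PySem.List.sorted A (fun x => x) false) []

-- ===== PRECONDITION & SPEC =====
def Spec_can_merge_strings (N : Int) (A : List Int) (out : String) : Prop := out = can_merge_strings_alt N A
instance (N : Int) (A : List Int) (out : String) : Decidable (Spec_can_merge_strings N A out) := by unfold Spec_can_merge_strings; infer_instance

-- ===== CLAIM (what is proved, stated in full; the proofs are below) =====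
def Claim_equal_can_merge_strings : Prop := ∀ (N : Int) (A : List Int), Dom_can_merge_strings N A → Spec_can_merge_strings N A (can_merge_strings N A)

-- ===== LEMMAS AND PROOFS =====

-- the sorted pool A maintains, as seen from B's two queues
def pvMerge : List Int → List Int → List Int
  | [], q => q
  | x :: xs, [] => x :: xs
  | x :: xs, y :: q => if x ≤ y then x :: pvMerge xs (y :: q) else y :: pvMerge (x :: xs) q
  termination_by xs q => xs.length + q.length

theorem pvMerge_perm (xs q : List Int) : (pvMerge xs q).Perm (xs ++ q) := by
  induction xs, q using pvMerge.induct with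
  | case1 q => simp [pvMerge]
  | case2 x xs => simp [pvMerge]
  | case3 x xs y q hxy ih =>
      rw [pvMerge, if_pos hxy]
      exact (ih.cons x)
  | case4 x xs y q hxy ih =>
      rw [pvMerge, if_neg hxy]
      exact (ih.cons y).trans List.perm_middle.symm

theorem pvMerge_pairwise {xs q : List Int}
    (hxs : xs.Pairwise (· ≤ ·)) (hq : q.Pairwise (· ≤ ·)) :
    (pvMerge xs q).Pairwise (· ≤ ·) := by
  induction xs, q using pvMerge.induct with
  | case1 q => simpa [pvMerge] using hq
  | case2 x xs => simpa [pvMerge] using hxs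
  | case3 x xs y q hxy ih =>
      rw [pvMerge, if_pos hxy]
      rcases List.pairwise_cons.mp hxs with ⟨hx, hxs'⟩
      refine List.pairwise_cons.mpr ⟨?_, ih hxs' hq⟩
      intro z hz
      have hz' := (pvMerge_perm xs (y :: q)).mem_iff.mp hz
      rcases List.mem_append.mp hz' with h | h
      · exact hx z h
      · rcases List.mem_cons.mp h with h | h
        · omega
        · rcases List.pairwise_cons.mp hq with ⟨hy, _⟩
          have := hy z h; omega
  | case4 x xs y q hxy ih =>
      rw [pvMerge, if_neg hxy]
      rcases List.pairwise_cons.mp hq with ⟨hy, hq'⟩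
      refine List.pairwise_cons.mpr ⟨?_, ih hxs hq'⟩
      intro z hz
      have hz' := (pvMerge_perm (x :: xs) q).mem_iff.mp hz
      rcases List.mem_append.mp hz' with h | h
      · rcases List.mem_cons.mp h with h | h
        · omega
        · rcases List.pairwise_cons.mp hxs with ⟨hx, _⟩
          have := hx z h; omega
      · exact hy z h

-- pvPop unconses pvMerge
theorem pvPop_none_iff (xs q : List Int) : pvPop xs q = none ↔ pvMerge xs q = [] := by
  match xs, q with
  | [], [] => simp [pvPop, pvMerge]
  | x :: xs, [] => simp [pvPop, pvMerge]
  | [], y :: q => simp [pvPop, pvMerge]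
  | x :: xs, y :: q => rw [pvPop, pvMerge]; split <;> simp

theorem pvMerge_cons {xs q xs' q' : List Int} {v : Int}
    (h : pvPop xs q = some (v, xs', q')) :
    pvMerge xs q = v :: pvMerge xs' q' := by
  match xs, q with
  | [], [] => simp [pvPop] at h
  | x :: xs, [] =>
      simp [pvPop] at h; obtain ⟨h1, h2, h3⟩ := h; subst h1; subst h2; subst h3
      cases xs <;> simp [pvMerge]
  | [], y :: q =>
      simp [pvPop] at h; obtain ⟨h1, h2, h3⟩ := h; subst h1; subst h2; subst h3
      simp [pvMerge]
  | x :: xs, y :: q =>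
      rw [pvPop] at h; rw [pvMerge]
      split at h <;> rename_i hc <;>
        (simp at h; obtain ⟨h1, h2, h3⟩ := h; subst h1; subst h2; subst h3; simp [hc])

-- pvPop takes its element from the front of one queue, leaving the other intact
theorem pvPop_cases {xs q xs' q' : List Int} {v : Int}
    (h : pvPop xs q = some (v, xs', q')) :
    (xs = v :: xs' ∧ q' = q) ∨ (xs' = xs ∧ q = v :: q') := by
  match xs, q with
  | [], [] => simp [pvPop] at h
  | x :: xs, [] =>
      simp [pvPop] at h; obtain ⟨h1, h2, h3⟩ := h; subst h1; subst h2; subst h3; simp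
  | [], y :: q =>
      simp [pvPop] at h; obtain ⟨h1, h2, h3⟩ := h; subst h1; subst h2; subst h3; simp
  | x :: xs, y :: q =>
      rw [pvPop] at h
      split at h <;>
        (simp at h; obtain ⟨h1, h2, h3⟩ := h; subst h1; subst h2; subst h3; simp)

-- Huffman invariant: both queues sorted; every queued sum decomposes as c + d with
-- c ≤ d below every unconsumed original and below every sum queued earlier
def pvInv (xs q : List Int) : Prop :=
  xs.Pairwise (· ≤ ·) ∧ q.Pairwise (· ≤ ·) ∧
  (∀ s ∈ q, ∃ c d : Int, s = c + d ∧ c ≤ d ∧ ∀ x ∈ xs, d ≤ x) ∧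
  q.Pairwise (fun p s => ∃ c d : Int, s = c + d ∧ c ≤ d ∧ d ≤ p)

-- A's halving check, for a ≤ b, is exactly b ≤ a + 1
theorem pvCheck_iff {a b : Int} (hab : a ≤ b) :
    (a ≠ PySem.Int.floordiv (a + b) 2 ∨ b ≠ PySem.Int.floordiv (a + b + 1) 2) ↔ a + 1 < b := by
  rw [PySem.Int.floordiv_eq_ediv_of_pos (by omega), PySem.Int.floordiv_eq_ediv_of_pos (by omega)]
  omega

theorem pvPop_sublist {xs q xs' q' : List Int} {v : Int}
    (h : pvPop xs q = some (v, xs', q')) : xs'.Sublist xs ∧ q'.Sublist q := by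
  rcases pvPop_cases h with ⟨h1, h2⟩ | ⟨h1, h2⟩
  · subst h2; exact ⟨h1 ▸ List.sublist_cons_self v xs', List.Sublist.refl _⟩
  · subst h1; exact ⟨List.Sublist.refl _, h2 ▸ List.sublist_cons_self v q'⟩

theorem pvMain (n : Nat) (xs q : List Int) (hn : xs.length + q.length ≤ n)
    (hinv : pvInv xs q) : pvAloop (pvMerge xs q) = pvBloop xs q := by
  induction n generalizing xs q with
  | zero =>
      have hx : xs = [] := List.length_eq_zero_iff.mp (by omega)
      have hq : q = [] := List.length_eq_zero_iff.mp (by omega)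
      subst hx; subst hq
      rw [pvBloop.eq_def]; simp [pvPop, pvMerge, pvAloop]
  | succ n ih =>
      obtain ⟨hPxs, hPq, hDec, hBef⟩ := hinv
      rw [pvBloop.eq_def]
      split
      · -- pvPop xs q = none
        rename_i h1
        rw [(pvPop_none_iff xs q).mp h1]
        simp [pvAloop]
      · rename_i a xs1 q1 h1
        have hm1 : pvMerge xs q = a :: pvMerge xs1 q1 := pvMerge_cons h1
        split
        · -- pvPop xs1 q1 = none
          rename_i h2
          rw [hm1, (pvPop_none_iff xs1 q1).mp h2]
          simp [pvAloop]
        · rename_i b xs2 q2 h2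
          have hm2 : pvMerge xs1 q1 = b :: pvMerge xs2 q2 := pvMerge_cons h2
          have hPW : (pvMerge xs q).Pairwise (· ≤ ·) := pvMerge_pairwise hPxs hPq
          rw [hm1, hm2] at hPW
          rcases List.pairwise_cons.mp hPW with ⟨ha, hPW'⟩
          rcases List.pairwise_cons.mp hPW' with ⟨hrest, _⟩
          have hab : a ≤ b := ha b (List.mem_cons_self)
          have hsub1 := pvPop_sublist h1
          have hsub2 := pvPop_sublist h2
          -- every element left in either queue is ≥ b
          have hge : ∀ z : Int, z ∈ xs2 ∨ z ∈ q2 → b ≤ z := by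
            intro z hz
            refine hrest z ((pvMerge_perm xs2 q2).mem_iff.mpr (List.mem_append.mpr hz))
          -- membership transfer back to the original q
          have hq2q : ∀ s ∈ q2, s ∈ q := by
            intro s hs
            have hs1 : s ∈ q1 := hsub2.2.subset hs
            rcases pvPop_cases h1 with ⟨_, hq1⟩ | ⟨_, hq1⟩
            · exact hq1 ▸ hs1
            · exact hq1 ▸ List.mem_cons_of_mem a hs1
          -- every queued sum is ≤ a + b
          have hqle : ∀ s ∈ q2, s ≤ a + b := by
            intro s hs
            have hs1 : s ∈ q1 := hsub2.2.subset hs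
            rcases pvPop_cases h1 with ⟨hxs, hq1⟩ | ⟨hxs1, hq1⟩
            · -- a was taken from xs
              obtain ⟨c, d, hsd, hcd, hdx⟩ := hDec s (hq1 ▸ hs1)
              have hda : d ≤ a := hdx a (hxs ▸ List.mem_cons_self)
              omega
            · -- a was taken from q, so a precedes s in q
              have := (List.pairwise_cons.mp (hq1 ▸ hBef)).1 s hs1
              obtain ⟨c, d, hsd, hcd, hda⟩ := this
              omega
          rw [hm1, hm2]
          simp only [pvAloop]
          by_cases hb : a + 1 < b
          · rw [if_pos ((pvCheck_iff hab).mpr hb), if_pos hb]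
          · rw [if_neg (fun hc => hb ((pvCheck_iff hab).mp hc)), if_neg hb]
            -- the new invariant
            have hPxs2 : xs2.Pairwise (· ≤ ·) := hPxs.sublist (hsub2.1.trans hsub1.1)
            have hPq2 : q2.Pairwise (· ≤ ·) := hPq.sublist (hsub2.2.trans hsub1.2)
            have hPq' : (q2 ++ [a + b]).Pairwise (· ≤ ·) := by
              refine List.pairwise_append.mpr ⟨hPq2, List.pairwise_singleton _ _, ?_⟩
              intro s hs t ht
              rw [List.mem_singleton.mp ht]
              exact hqle s hs
            have hDec' : ∀ s ∈ q2 ++ [a + b],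
                ∃ c d : Int, s = c + d ∧ c ≤ d ∧ ∀ x ∈ xs2, d ≤ x := by
              intro s hs
              rcases List.mem_append.mp hs with hs | hs
              · obtain ⟨c, d, hsd, hcd, hdx⟩ := hDec s (hq2q s hs)
                exact ⟨c, d, hsd, hcd, fun x hx => hdx x ((hsub2.1.trans hsub1.1).subset hx)⟩
              · rw [List.mem_singleton.mp hs]
                exact ⟨a, b, rfl, hab, fun x hx => hge x (Or.inl hx)⟩
            have hBef' : (q2 ++ [a + b]).Pairwise
                (fun p s => ∃ c d : Int, s = c + d ∧ c ≤ d ∧ d ≤ p) := by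
              refine List.pairwise_append.mpr
                ⟨hBef.sublist (hsub2.2.trans hsub1.2), List.pairwise_singleton _ _, ?_⟩
              intro p hp t ht
              rw [List.mem_singleton.mp ht]
              exact ⟨a, b, rfl, hab, hge p (Or.inr hp)⟩
            -- A's re-sorted pool is exactly B's merged view of the new queues
            have hperm : (pvMerge xs2 (q2 ++ [a + b])).Perm (pvMerge xs2 q2 ++ [a + b]) := by
              refine (pvMerge_perm xs2 (q2 ++ [a + b])).trans ?_
              rw [← List.append_assoc]
              exact ((pvMerge_perm xs2 q2).symm.append_right [a + b])
            have hsorted : PySem.List.sorted (pvMerge xs2 q2 ++ [a + b]) (fun x => x) false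
                = pvMerge xs2 (q2 ++ [a + b]) :=
              PySem.List.sorted_id_eq_of_perm_of_pairwise _ _ hperm (pvMerge_pairwise hPxs2 hPq')
            rw [hsorted]
            have hlen1 := pvPop_length h1
            have hlen2 := pvPop_length h2
            exact ih xs2 (q2 ++ [a + b]) (by simp; omega) ⟨hPxs2, hPq', hDec', hBef'⟩

theorem pv_alt_eq (N : Int) (A : List Int) :
    can_merge_strings N A = can_merge_strings_alt N A := by
  unfold can_merge_strings can_merge_strings_alt
  have hnil : pvMerge (PySem.List.sorted A (fun x => x) false) [] =
      PySem.List.sorted A (fun x => x) false := by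
    cases h : PySem.List.sorted A (fun x => x) false <;> simp [pvMerge]
  have hPW : (PySem.List.sorted A (fun x => x) false).Pairwise (· ≤ ·) :=
    PySem.List.sorted_pairwise A (fun x => x)
  calc pvAloop (PySem.List.sorted A (fun x => x) false)
      = pvAloop (pvMerge (PySem.List.sorted A (fun x => x) false) []) := by rw [hnil]
    _ = pvBloop (PySem.List.sorted A (fun x => x) false) [] :=
        pvMain (A.length + 0) _ _ (by simp [PySem.List.length_sorted]) 
          ⟨hPW, List.Pairwise.nil, by simp, List.Pairwise.nil⟩

-- ===== VERDICT (by name: the statement is the Claim_ definition above) =====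
theorem can_merge_strings_spec : Claim_equal_can_merge_strings := by
  intro N A _
  unfold Spec_can_merge_strings
  exact pv_alt_eq N A
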